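-- pv_equiv track=rewrite | github.com/happa64/AtCoder_Beginner_Contest | ABC/ABC126/ABC126-F.py | debug
-- ===== SOURCE A (Python) =====
-- def debug(L, k):
--     n = len(L)
--     used = set()
--     for i in range(n):
--         if L[i] in used:
--             continue
--         used.add(L[i])
--         t = L[i]
--         for j in range(i + 1, n):
--             t ^= L[j]
--             if L[i] == L[j]:
--                 break
--         if t != k:
--             return False
--     return True
-- ===== SOURCE B (Python) =====
-- def debug(L, k):
--     # One pass with a running prefix-xor: remember the prefix-xor before each
--     # value's first occurrence, check the segment when the value reappears,
--     # and check still-open segments against the final prefix-xor at the end.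
--     pre = 0
--     open_ = {}
--     closed = set()
--     for x in L:
--         if x in closed:
--             pass
--         elif x in open_:
--             if pre ^ x ^ open_[x] != k:
--                 return False
--             closed.add(x)
--         else:
--             open_[x] = pre
--         pre ^= x
--     for x, s in open_.items():
--         if x in closed:
--             continue
--         if pre ^ s != k:
--             return False
--     return True
-- ===== Notes on version B (the rewrite author's own statement) =====
-- stated objective: faster
-- what changed: Replaces A's per-distinct-value rescan of the suffix with a single pass that keeps a running prefix-xor and a dict mapping each value seen once to the prefix-xor before its first occurrence, checking a segment when its value reappears and checking still-open segments against the final prefix-xor.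
import Mathlib
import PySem

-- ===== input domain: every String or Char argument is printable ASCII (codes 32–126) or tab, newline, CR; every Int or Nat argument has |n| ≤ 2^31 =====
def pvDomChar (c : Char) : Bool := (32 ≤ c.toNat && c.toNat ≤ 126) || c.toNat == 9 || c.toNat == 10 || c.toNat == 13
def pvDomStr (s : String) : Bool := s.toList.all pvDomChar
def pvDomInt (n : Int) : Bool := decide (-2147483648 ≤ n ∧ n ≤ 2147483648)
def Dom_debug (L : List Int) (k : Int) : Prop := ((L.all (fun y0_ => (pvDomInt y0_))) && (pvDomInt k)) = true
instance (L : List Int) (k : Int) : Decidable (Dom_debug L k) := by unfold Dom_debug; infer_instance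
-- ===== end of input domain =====

-- B replaces A's quadratic rescan-per-distinct-value with one pass keeping a running
-- prefix-xor and a dict of each open segment's starting prefix-xor (same return value).

-- ===== PORT A =====
-- inner 'for j in range(i+1, n): t ^= L[j]; if L[i] == L[j]: break' over the suffix after i
def innerA (x : Int) (t : Int) : List Int → Int
  | [] => t
  | y :: ys => if x == y then PySem.Int.bxor t y else innerA x (PySem.Int.bxor t y) ys

-- outer 'for i in range(n)' loop; the suffix argument is L[i:], 'used' is A's set
def outerA (k : Int) (used : PySem.Set Int) : List Int → Bool
  | [] => true
  | x :: rest =>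
    if PySem.Set.contains used x then outerA k used rest
    else
      let t := innerA x x rest
      if t != k then false else outerA k (PySem.Set.add used x) rest

def debug (L : List Int) (k : Int) : Bool := outerA k PySem.Set.empty L

-- ===== PORT B =====
-- final 'for x, s in open_.items(): …' loop of Source B
def endB (k : Int) (pre : Int) (closed : PySem.Set Int) : List (Int × Int) → Bool
  | [] => true
  | (x, s) :: rest =>
    if PySem.Set.contains closed x then endB k pre closed rest
    else if PySem.Int.bxor pre s != k then false
    else endB k pre closed rest

-- main 'for x in L' loop of Source B: pre = running prefix xor, opn = open_, closed = closed
def loopB (k : Int) (pre : Int) (opn : PySem.Dict Int Int) (closed : PySem.Set Int) :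
    List Int → Bool
  | [] => endB k pre closed opn.items
  | x :: rest =>
    if PySem.Set.contains closed x then
      loopB k (PySem.Int.bxor pre x) opn closed rest
    else if PySem.Dict.contains opn x then
      -- 'open_[x]' is guarded by 'x in open_', so getD is exact here
      if PySem.Int.bxor (PySem.Int.bxor pre x) (PySem.Dict.getD opn x 0) != k then false
      else loopB k (PySem.Int.bxor pre x) opn (PySem.Set.add closed x) rest
    else
      loopB k (PySem.Int.bxor pre x) (PySem.Dict.insert opn x pre) closed rest

def debug_alt (L : List Int) (k : Int) : Bool :=
  loopB k 0 PySem.Dict.empty PySem.Set.empty L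

-- ===== PRECONDITION & SPEC =====
def Spec_debug (L : List Int) (k : Int) (out : Bool) : Prop := out = debug_alt L k
instance (L : List Int) (k : Int) (out : Bool) : Decidable (Spec_debug L k out) := by unfold Spec_debug; infer_instance

-- ===== CLAIM (what is proved, stated in full; the proofs are below) =====
def Claim_equal_debug : Prop := ∀ (L : List Int) (k : Int), Dom_debug L k → Spec_debug L k (debug L k)

-- ===== LEMMAS AND PROOFS =====

-- xor algebra for PySem.Int.bxor
theorem bxor_eq_xor (a b : Int) : PySem.Int.bxor a b = Int.xor a b := by
  cases a <;> cases b <;>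
    simp [PySem.Int.bxor, Int.xor] <;> omega

theorem bxor_assoc (a b c : Int) :
    PySem.Int.bxor (PySem.Int.bxor a b) c = PySem.Int.bxor a (PySem.Int.bxor b c) := by
  simp only [bxor_eq_xor]
  cases a <;> cases b <;> cases c <;> simp [Int.xor, Nat.xor_assoc]

theorem bxor_zero_left (a : Int) : PySem.Int.bxor 0 a = a := by
  rw [PySem.Int.bxor_comm]; exact PySem.Int.bxor_zero a

-- ((pre ^ x) ^ w) ^ pre = x ^ w
theorem bxor_cancel_outer (pre x w : Int) :
    PySem.Int.bxor (PySem.Int.bxor (PySem.Int.bxor pre x) w) pre =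
      PySem.Int.bxor x w := by
  rw [PySem.Int.bxor_comm _ pre, ← bxor_assoc, ← bxor_assoc,
      PySem.Int.bxor_self, bxor_zero_left]

-- segment take-through: the suffix up to and including the next occurrence of x
def tThru (x : Int) : List Int → List Int
  | [] => []
  | y :: ys => if x = y then [y] else y :: tThru x ys

def xorAll (l : List Int) : Int := l.foldl PySem.Int.bxor 0

theorem foldl_bxor_shift (l : List Int) (t : Int) :
    l.foldl PySem.Int.bxor t = PySem.Int.bxor t (xorAll l) := by
  induction l generalizing t with
  | nil => simp [xorAll, PySem.Int.bxor_zero]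
  | cons y ys ih =>
    simp only [xorAll, List.foldl_cons]
    rw [ih (PySem.Int.bxor t y), ih (PySem.Int.bxor 0 y), bxor_zero_left, bxor_assoc]

theorem xorAll_cons (y : Int) (ys : List Int) :
    xorAll (y :: ys) = PySem.Int.bxor y (xorAll ys) := by
  simp only [xorAll, List.foldl_cons]
  rw [foldl_bxor_shift, bxor_zero_left]
  rfl

-- the common reference form: lookahead check per first occurrence
def segChk (k x : Int) (S : List Int) : Bool :=
  PySem.Int.bxor x (xorAll (tThru x S)) == k

def ref (k : Int) (m : Int → Bool) : List Int → Bool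
  | [] => true
  | x :: S => if m x then ref k m S else (segChk k x S && ref k (fun y => y == x || m y) S)

theorem ref_congr (k : Int) (S : List Int) (m m' : Int → Bool)
    (h : ∀ y, m y = m' y) : ref k m S = ref k m' S := by
  induction S generalizing m m' with
  | nil => rfl
  | cons x S ih =>
    simp only [ref, h x]
    by_cases hx : m' x = true
    · simp [hx, ih m m' h]
    · rw [ih (fun y => y == x || m y) (fun y => y == x || m' y) (fun y => by simp [h y])]
      simp [hx]

-- ===== A equals ref =====
theorem innerA_eq (x : Int) (S : List Int) : ∀ t, innerA x t S = PySem.Int.bxor t (xorAll (tThru x S)) := by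
  induction S with
  | nil => intro t; simp [innerA, tThru, xorAll, PySem.Int.bxor_zero]
  | cons y ys ih =>
    intro t
    by_cases hxy : x = y
    · simp only [innerA, tThru, hxy, beq_self_eq_true, if_true, xorAll, List.foldl_cons,
        List.foldl_nil, bxor_zero_left]
    · simp only [innerA, tThru, beq_iff_eq, if_neg hxy]
      rw [ih, xorAll_cons, bxor_assoc]

theorem outerA_eq_ref (k : Int) (S : List Int) :
    ∀ (u : PySem.Set Int) (m : Int → Bool),
      (∀ y, PySem.Set.contains u y = m y) → outerA k u S = ref k m S := by
  induction S with
  | nil => intro u m _; rfl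
  | cons x S ih =>
    intro u m hm
    simp only [outerA, ref, hm x]
    by_cases hx : m x = true
    · simp [hx, ih u m hm]
    · have hx' : m x = false := by simpa using hx
      have hadd : ∀ y, PySem.Set.contains (PySem.Set.add u x) y = (y == x || m y) := by
        intro y
        rw [Bool.eq_iff_iff]
        simp only [PySem.Set.contains_iff, PySem.Set.mem_add, Bool.or_eq_true, beq_iff_eq]
        rw [← hm y]
        simp only [PySem.Set.contains_iff]
        tauto
      rw [innerA_eq]
      simp only [hx', segChk]
      by_cases hk : PySem.Int.bxor x (xorAll (tThru x S)) = k
      · simp [hk, ih _ _ hadd]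
      · simp [hk]

-- ===== B equals ref =====
-- pending check of one open entry p = (value, stored prefix xor)
def pchk (k pre : Int) (closed : PySem.Set Int) (S : List Int) (p : Int × Int) : Bool :=
  PySem.Set.contains closed p.1 ||
    (PySem.Int.bxor (PySem.Int.bxor pre (xorAll (tThru p.1 S))) p.2 == k)

theorem endB_eq_all (k pre : Int) (closed : PySem.Set Int) (l : List (Int × Int)) :
    endB k pre closed l = l.all (fun p => PySem.Set.contains closed p.1 || (PySem.Int.bxor pre p.2 == k)) := by
  induction l with
  | nil => rfl
  | cons p rest ih =>
    obtain ⟨x, s⟩ := p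
    by_cases hc : x ∈ closed
    · simp [endB, hc, ih]
    · by_cases hk : PySem.Int.bxor pre s = k
      · simp [endB, hc, hk, ih]
      · simp [endB, hc, hk]

theorem all_congr_mem (l : List (Int × Int)) (f g : Int × Int → Bool)
    (h : ∀ p ∈ l, f p = g p) : l.all f = l.all g := by
  induction l with
  | nil => rfl
  | cons q rest ih => simp [List.all_cons, h q (by simp), ih (fun p hp => h p (by simp [hp]))]

theorem all_extract (l : List (Int × Int)) (x : Int) (c : Bool) (f g : Int × Int → Bool)
    (hfg : ∀ p ∈ l, p.1 ≠ x → f p = g p)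
    (hfx : ∀ p ∈ l, p.1 = x → f p = c)
    (hgx : ∀ p ∈ l, p.1 = x → g p = true)
    (hx : ∃ p ∈ l, p.1 = x) :
    l.all f = (c && l.all g) := by
  induction l with
  | nil => simp at hx
  | cons q rest ih =>
    by_cases hq : q.1 = x
    · have hf : f q = c := hfx q (by simp) hq
      have hg : g q = true := hgx q (by simp) hq
      by_cases hr : ∃ p ∈ rest, p.1 = x
      · have := ih (fun p hp => hfg p (by simp [hp])) (fun p hp => hfx p (by simp [hp]))
          (fun p hp => hgx p (by simp [hp])) hr
        simp only [List.all_cons, hf, hg, this, Bool.true_and]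
        cases c <;> simp
      · push Not at hr
        have : rest.all f = rest.all g :=
          all_congr_mem rest f g (fun p hp => hfg p (by simp [hp]) (hr p hp))
        simp [List.all_cons, hf, hg, this]
    · have hr : ∃ p ∈ rest, p.1 = x := by
        rcases hx with ⟨p, hp, hpx⟩
        rcases List.mem_cons.mp hp with h | h
        · exact absurd (h ▸ hpx) hq
        · exact ⟨p, h, hpx⟩
      have := ih (fun p hp => hfg p (by simp [hp])) (fun p hp => hfx p (by simp [hp]))
        (fun p hp => hgx p (by simp [hp])) hr
      simp only [List.all_cons, hfg q (by simp) hq, this]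
      cases g q <;> cases c <;> simp

theorem pchk_shift (k pre x : Int) (closed : PySem.Set Int) (S : List Int)
    (p : Int × Int) (hpx : p.1 ≠ x) :
    pchk k pre closed (x :: S) p = pchk k (PySem.Int.bxor pre x) closed S p := by
  simp only [pchk, tThru, if_neg hpx]
  rw [xorAll_cons, ← bxor_assoc]

theorem contains_add_ne (closed : PySem.Set Int) (x y : Int) (h : y ≠ x) :
    PySem.Set.contains (PySem.Set.add closed x) y = PySem.Set.contains closed y := by
  rw [Bool.eq_iff_iff]
  simp only [PySem.Set.contains_iff, PySem.Set.mem_add]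
  tauto

theorem loopB_eq_ref (k : Int) (S : List Int) :
    ∀ (pre : Int) (opn : PySem.Dict Int Int) (closed : PySem.Set Int),
      opn.keys.Nodup →
      (∀ y, y ∈ closed → PySem.Dict.contains opn y = true) →
      loopB k pre opn closed S =
        (opn.items.all (pchk k pre closed S) &&
          ref k (fun y => PySem.Dict.contains opn y) S) := by
  induction S with
  | nil =>
    intro pre opn closed _ _
    simp only [loopB, ref, Bool.and_true]
    rw [endB_eq_all]
    apply all_congr_mem
    intro p _
    simp [pchk, tThru, xorAll, PySem.Int.bxor_zero]
  | cons x S ih =>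
    intro pre opn closed hnd hcl
    by_cases hc : x ∈ closed
    · -- x already closed: both sides skip it
      have hm : PySem.Dict.contains opn x = true := hcl x hc
      have h1 : loopB k pre opn closed (x :: S) =
          loopB k (PySem.Int.bxor pre x) opn closed S := by
        simp [loopB, hc]
      rw [h1, ih (PySem.Int.bxor pre x) opn closed hnd hcl]
      have h2 : ref k (fun y => PySem.Dict.contains opn y) (x :: S) =
          ref k (fun y => PySem.Dict.contains opn y) S := by
        simp [ref, hm]
      rw [h2]
      congr 1
      apply all_congr_mem
      intro p hp
      by_cases hpx : p.1 = x
      · simp [pchk, hpx, hc]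
      · exact (pchk_shift k pre x closed S p hpx).symm
    · by_cases hcd : PySem.Dict.contains opn x = true
      · -- second occurrence: B closes the segment now
        obtain ⟨s, hget⟩ : ∃ s, PySem.Dict.get? opn x = some s := by
          rw [PySem.Dict.contains_eq_isSome_get?] at hcd
          exact Option.isSome_iff_exists.mp hcd
        have hitem : (x, s) ∈ opn.items := PySem.Dict.mem_items_of_get?_eq_some opn hget
        have hgetD : PySem.Dict.getD opn x 0 = s := PySem.Dict.getD_of_get?_eq_some opn 0 hget
        have hcl' : ∀ y, y ∈ PySem.Set.add closed x → PySem.Dict.contains opn y = true := by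
          intro y hy
          rcases (PySem.Set.mem_add closed x y).mp hy with hy | hy
          · exact hcl y hy
          · exact hy ▸ hcd
        have hext : opn.items.all (pchk k pre closed (x :: S)) =
            ((PySem.Int.bxor (PySem.Int.bxor pre x) s == k) &&
              opn.items.all (pchk k (PySem.Int.bxor pre x) (PySem.Set.add closed x) S)) := by
          apply all_extract opn.items x _ _ _
          · intro p hp hpx
            rw [pchk_shift k pre x closed S p hpx]
            simp only [pchk]
            rw [contains_add_ne closed x p.1 hpx]
          · intro p hp hpx
            have hp2 : p.2 = s := by
              have := PySem.Dict.get?_of_mem_items opn (hpx ▸ hp : (x, p.2) ∈ opn.items) hnd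
              rw [hget] at this
              exact (Option.some_inj.mp this).symm
            simp [pchk, hpx, hp2, tThru, hc, xorAll, bxor_zero_left]
          · intro p hp hpx
            have : p.1 ∈ PySem.Set.add closed x := (PySem.Set.mem_add closed x p.1).mpr (Or.inr hpx)
            simp [pchk, this]
          · exact ⟨(x, s), hitem, rfl⟩
        have h2 : ref k (fun y => PySem.Dict.contains opn y) (x :: S) =
            ref k (fun y => PySem.Dict.contains opn y) S := by
          simp [ref, hcd]
        rw [hext, h2]
        have h1 : loopB k pre opn closed (x :: S) =
            (if PySem.Int.bxor (PySem.Int.bxor pre x) s != k then false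
             else loopB k (PySem.Int.bxor pre x) opn (PySem.Set.add closed x) S) := by
          simp [loopB, hc, hcd, hgetD]
        rw [h1, ih (PySem.Int.bxor pre x) opn (PySem.Set.add closed x) hnd hcl']
        by_cases hk : PySem.Int.bxor (PySem.Int.bxor pre x) s = k
        · simp [hk]
        · simp [hk]
      · -- first occurrence: B opens a segment, A checks by lookahead
        have hcd' : PySem.Dict.contains opn x = false := by simpa using hcd
        have h1 : loopB k pre opn closed (x :: S) =
            loopB k (PySem.Int.bxor pre x) (PySem.Dict.insert opn x pre) closed S := by
          simp [loopB, hc, hcd']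
        have hnd' : (PySem.Dict.insert opn x pre).keys.Nodup :=
          PySem.Dict.nodup_keys_insert opn x pre hnd
        have hcl' : ∀ y, y ∈ closed → PySem.Dict.contains (PySem.Dict.insert opn x pre) y = true := by
          intro y hy
          rw [PySem.Dict.contains_insert]
          simp [hcl y hy]
        rw [h1, ih (PySem.Int.bxor pre x) (PySem.Dict.insert opn x pre) closed hnd' hcl']
        rw [PySem.Dict.items_insert_of_not_contains opn pre hcd']
        rw [List.all_append]
        have hnew : [(x, pre)].all (pchk k (PySem.Int.bxor pre x) closed S) = segChk k x S := by
          simp only [List.all_cons, List.all_nil, Bool.and_true, pchk, segChk]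
          rw [bxor_cancel_outer]
          simp [hc]
        rw [hnew]
        have h2 : ref k (fun y => PySem.Dict.contains (PySem.Dict.insert opn x pre) y) S =
            ref k (fun y => y == x || PySem.Dict.contains opn y) S := by
          apply ref_congr
          intro y
          exact PySem.Dict.contains_insert opn x y pre
        rw [h2]
        have h3 : ref k (fun y => PySem.Dict.contains opn y) (x :: S) =
            (segChk k x S && ref k (fun y => y == x || PySem.Dict.contains opn y) S) := by
          simp [ref, hcd']
        rw [h3]
        have h4 : opn.items.all (pchk k pre closed (x :: S)) =
            opn.items.all (pchk k (PySem.Int.bxor pre x) closed S) := by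
          apply all_congr_mem
          intro p hp
          have hpx : p.1 ≠ x := by
            intro h
            have : p.1 ∈ opn.keys := PySem.Dict.mem_keys_of_mem_items opn hp
            rw [h] at this
            rw [← PySem.Dict.contains_iff_mem_keys] at this
            rw [hcd'] at this
            exact Bool.false_ne_true this
          exact pchk_shift k pre x closed S p hpx
        rw [h4]
        cases opn.items.all (pchk k (PySem.Int.bxor pre x) closed S) <;>
          cases segChk k x S <;>
            cases ref k (fun y => y == x || PySem.Dict.contains opn y) S <;> simp

-- ===== VERDICT (by name: the statement is the Claim_ definition above) =====
theorem debug_spec : Claim_equal_debug := by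
  intro L k _
  unfold Spec_debug debug debug_alt
  rw [outerA_eq_ref k L PySem.Set.empty (fun y => PySem.Dict.contains (PySem.Dict.empty (κ := Int) (ν := Int)) y)
      (by intro y; simp [PySem.Set.empty, PySem.Set.contains_eq_listContains, PySem.Dict.contains_empty])]
  rw [loopB_eq_ref k L 0 PySem.Dict.empty PySem.Set.empty PySem.Dict.nodup_keys_empty (by intro y hy; simp [PySem.Set.empty] at hy)]
  simp [PySem.Dict.empty]
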